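-- pv_equiv track=rewrite | github.com/predkambrij/easeRead | bookCrammingModule/textProcessor.py | prepareFreqLen
-- ===== SOURCE A (Python) =====
-- def prepareFreqLen(wordsToCram):
--     freqLen = {}
--     for word, stat in sorted(list(wordsToCram.items()), key=lambda x: x[1][0], reverse=True):
--         if not (stat[0] in freqLen):
--             freqLen[stat[0]] = 0
--         freqLen[stat[0]] += 1
--
--     freqLen2 = {}
--     totalWords = 0
--     for frequency, numOfWords in sorted(list(freqLen.items()), key=lambda x: x[0], reverse=True):
--         totalWords += numOfWords
--         freqLen2[frequency] = totalWords
--     return freqLen2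
-- ===== SOURCE B (Python) =====
-- def prepareFreqLen(wordsToCram):
--     freqLen2 = {}
--     count = 0
--     for v in sorted((stat[0] for stat in wordsToCram.values()), reverse=True):
--         count += 1
--         freqLen2[v] = count
--     return freqLen2
-- ===== Notes on version B (the rewrite author's own statement) =====
-- stated objective: simpler
-- what changed: Replaces the two-phase count-then-accumulate (a histogram dict built from a sort of the items, then a second sort over its distinct keys with a cumulative sum) by one descending sort of the frequency values and a single pass with a running counter whose dict overwrites on equal-value runs yield the cumulative counts directly.
import Mathlib
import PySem

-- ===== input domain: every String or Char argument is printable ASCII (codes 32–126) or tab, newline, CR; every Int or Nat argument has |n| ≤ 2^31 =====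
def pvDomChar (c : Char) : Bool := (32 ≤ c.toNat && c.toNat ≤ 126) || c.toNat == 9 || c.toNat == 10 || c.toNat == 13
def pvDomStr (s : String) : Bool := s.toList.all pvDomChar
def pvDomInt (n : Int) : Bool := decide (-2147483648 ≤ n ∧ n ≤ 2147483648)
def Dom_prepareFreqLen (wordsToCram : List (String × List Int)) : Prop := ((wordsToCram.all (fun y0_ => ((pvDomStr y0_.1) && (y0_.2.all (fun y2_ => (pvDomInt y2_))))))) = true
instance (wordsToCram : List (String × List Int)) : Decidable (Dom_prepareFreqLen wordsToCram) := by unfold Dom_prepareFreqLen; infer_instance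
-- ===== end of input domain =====

-- B replaces A's two-phase count-then-accumulate (histogram dict + second sort of the
-- distinct keys) by one descending sort of the frequency values and a single pass with a
-- running counter whose overwrites on equal-value runs yield the cumulative counts (simpler).

-- ===== PORT A =====
def prepareFreqLen (wordsToCram : List (String × List Int)) : List (Int × Int) :=
  let freqLen := (PySem.List.sorted (PySem.Dict.ofList wordsToCram).items
      (fun x => PySem.List.pyGetD x.2 0 0) true).foldl
    (fun (freqLen : PySem.Dict Int Int) p =>
      let v := PySem.List.pyGetD p.2 0 0
      let freqLen := if freqLen.contains v then freqLen else freqLen.insert v 0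
      freqLen.insert v (freqLen.getD v 0 + 1)) PySem.Dict.empty
  ((PySem.List.sorted freqLen.items (fun x => x.1) true).foldl
    (fun (acc : PySem.Dict Int Int × Int) e =>
      let tot := acc.2 + e.2
      (acc.1.insert e.1 tot, tot)) (PySem.Dict.empty, (0 : Int))).1.items

-- ===== PORT B =====
def prepareFreqLen_alt (wordsToCram : List (String × List Int)) : List (Int × Int) :=
  ((PySem.List.sorted ((PySem.Dict.ofList wordsToCram).values.map
      (fun stat => PySem.List.pyGetD stat 0 0)) (fun v => v) true).foldl
    (fun (acc : PySem.Dict Int Int × Int) v =>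
      let c := acc.2 + 1
      (acc.1.insert v c, c)) (PySem.Dict.empty, (0 : Int))).1.items

-- ===== PRECONDITION & SPEC =====
-- Pre_ excludes entries whose value list is empty: there Python A raises IndexError on stat[0].
def Pre_prepareFreqLen (wordsToCram : List (String × List Int)) : Prop :=
  ∀ p ∈ wordsToCram, p.2 ≠ []
instance (wordsToCram : List (String × List Int)) : Decidable (Pre_prepareFreqLen wordsToCram) := by
  unfold Pre_prepareFreqLen; infer_instance

def pvWitness_prepareFreqLen : (List (String × List Int)) :=
  [("a", [2]), ("b", [1]), ("c", [2])]

def Spec_prepareFreqLen (wordsToCram : List (String × List Int)) (out : List (Int × Int)) : Prop := out = prepareFreqLen_alt wordsToCram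
instance (wordsToCram : List (String × List Int)) (out : List (Int × Int)) : Decidable (Spec_prepareFreqLen wordsToCram out) := by unfold Spec_prepareFreqLen; infer_instance

-- ===== CLAIM (what is proved, stated in full; the proofs are below) =====
def Claim_equal_prepareFreqLen : Prop := ∀ (wordsToCram : List (String × List Int)), Dom_prepareFreqLen wordsToCram → Pre_prepareFreqLen wordsToCram → Spec_prepareFreqLen wordsToCram (prepareFreqLen wordsToCram)

-- ===== LEMMAS AND PROOFS =====

-- value stored for key u after B's pass over prefix q: how many elements of q are ≥ u
def pvCnt (q : List Int) (u : Int) : Int := (q.countP (fun x => decide (u ≤ x)) : Int)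

-- the cumulative-sum list A's second loop produces from a (key, count) list
def pvCum (t : Int) : List (Int × Int) → List (Int × Int)
  | [] => []
  | (w, c) :: r => (w, t + c) :: pvCum (t + c) r

theorem pv_ofList_sublist {α : Type} [BEq α] [LawfulBEq α] (xs : List α) :
    (PySem.Set.ofList xs).Sublist xs := by
  induction xs using List.reverseRecOn with
  | nil => simp [PySem.Set.ofList]
  | append_singleton ys y ih =>
    rw [PySem.Set.ofList_append_singleton, PySem.Set.add_eq_ite]
    split
    · exact ih.trans (List.sublist_append_left ys [y])
    · exact ih.append_right [y]

theorem pv_countP_split (P Q R : Int → Bool) :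
    ∀ vs : List Int, (∀ x ∈ vs, (P x = true ↔ (Q x = true ∨ R x = true)) ∧ ¬(Q x = true ∧ R x = true)) →
    vs.countP P = vs.countP Q + vs.countP R := by
  intro vs
  induction vs with
  | nil => simp
  | cons a l ih =>
    intro h
    have ha := h a (by simp)
    have hl := ih (fun x hx => h x (by simp [hx]))
    simp only [List.countP_cons, hl]
    by_cases hq : Q a = true <;> by_cases hr : R a = true <;>
      simp [hq, hr, ha.1] at * <;> omega

-- step function of A's first loop = the counter step
theorem pv_stepA_eq (d : PySem.Dict Int Int) (v : Int) :
    (let d' := if d.contains v then d else d.insert v 0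
     d'.insert v (d'.getD v 0 + 1)) = d.insert v (d.getD v 0 + 1) := by
  by_cases h : d.contains v = true
  · simp [h]
  · simp only [Bool.not_eq_true] at h
    simp [h, PySem.Dict.getD_insert_self, PySem.Dict.insert_insert_self,
      PySem.Dict.getD_of_not_contains _ _ h]

-- A's second loop over fresh distinct keys appends the cumulative list
theorem pv_phase2 (ys : List (Int × Int)) :
    ∀ (d : PySem.Dict Int Int) (t : Int), (∀ p ∈ ys, d.contains p.1 = false) → (ys.map (·.1)).Nodup →
    ((ys.foldl (fun (acc : PySem.Dict Int Int × Int) e =>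
        (acc.1.insert e.1 (acc.2 + e.2), acc.2 + e.2)) (d, t)).1).items
      = d.items ++ pvCum t ys := by
  induction ys with
  | nil => intro d t _ _; simp [pvCum]
  | cons e r ih =>
    intro d t hfresh hnd
    obtain ⟨w, c⟩ := e
    simp only [List.foldl_cons]
    rw [ih _ _ ?_ ?_]
    · rw [PySem.Dict.items_insert_of_not_contains _ _ (hfresh (w, c) (by simp))]
      simp [pvCum]
    · intro p hp
      rw [PySem.Dict.contains_insert]
      have h1 : d.contains p.1 = false := hfresh p (by simp [hp])
      have h2 : p.1 ≠ w := by
        simp only [List.map_cons, List.nodup_cons] at hnd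
        intro he; exact hnd.1 (he ▸ List.mem_map_of_mem hp)
      simp [h1, h2]
    · simp only [List.map_cons, List.nodup_cons] at hnd; exact hnd.2

-- B's loop invariant: after consuming prefix q of the descending list,
-- the dict holds each distinct value of q paired with the number of elements ≥ it.
-- inserting the next (smallest-so-far) value updates the invariant table
theorem pv_insert_step (q : List Int) (v : Int) (hge : ∀ x ∈ q, v ≤ x) :
    (PySem.Dict.mk ((PySem.Set.ofList q).map (fun u => (u, pvCnt q u)))).insert v ((q.length : Int) + 1)
      = PySem.Dict.mk ((PySem.Set.ofList (q ++ [v])).map (fun u => (u, pvCnt (q ++ [v]) u))) := by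
  have hkeys : (PySem.Dict.mk ((PySem.Set.ofList q).map (fun u => (u, pvCnt q u)))).contains v
      = decide (v ∈ q) := by
    rw [PySem.Dict.contains_eq_decide_mem_keys]
    simp [PySem.Dict.keys, List.map_map, Function.comp_def, PySem.Set.mem_ofList]
  have hfact1 : pvCnt (q ++ [v]) v = (q.length : Int) + 1 := by
    unfold pvCnt
    rw [List.countP_append, List.countP_eq_length.2 (fun x hx => by simpa using hge x hx)]
    simp
  have hfact2 : ∀ u ∈ q, u ≠ v → pvCnt (q ++ [v]) u = pvCnt q u := by
    intro u hu hne
    unfold pvCnt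
    rw [List.countP_append]
    have hnuv : ¬ (u ≤ v) := by have := hge u hu; omega
    simp [hnuv]
  apply PySem.Dict.ext
  by_cases hv : v ∈ q
  · rw [PySem.Dict.items_insert_of_contains _ _ (by rw [hkeys]; simp [hv])]
    rw [PySem.Set.ofList_append_singleton, PySem.Set.add_of_mem (by simp [PySem.Set.mem_ofList, hv])]
    show List.map _ (((PySem.Set.ofList q).map (fun u => (u, pvCnt q u)))) = _
    rw [List.map_map]
    apply List.map_congr_left
    intro u hu
    have hu' : u ∈ q := (PySem.Set.mem_ofList _ _).1 hu
    by_cases huv : u = v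
    · subst huv; simp [hfact1]
    · simp [huv, hfact2 u hu' huv]
  · rw [PySem.Dict.items_insert_of_not_contains _ _ (by rw [hkeys]; simp [hv])]
    rw [PySem.Set.ofList_append_singleton, PySem.Set.add_of_not_mem (by simp [PySem.Set.mem_ofList, hv])]
    show ((PySem.Set.ofList q).map (fun u => (u, pvCnt q u))) ++ _ = _
    rw [List.map_append]
    congr 1
    · apply List.map_congr_left
      intro u hu
      have hu' : u ∈ q := (PySem.Set.mem_ofList _ _).1 hu
      have huv : u ≠ v := fun h => hv (h ▸ hu')
      simp [hfact2 u hu' huv]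
    · simp [hfact1]

theorem pv_Bloop (t : List Int) :
    ∀ (q : List Int), (q ++ t).Pairwise (· ≥ ·) →
    (t.foldl (fun (acc : PySem.Dict Int Int × Int) v => (acc.1.insert v (acc.2 + 1), acc.2 + 1))
      (PySem.Dict.mk ((PySem.Set.ofList q).map (fun u => (u, pvCnt q u))), (q.length : Int)))
    = (PySem.Dict.mk ((PySem.Set.ofList (q ++ t)).map (fun u => (u, pvCnt (q ++ t) u))),
       ((q ++ t).length : Int)) := by
  induction t with
  | nil => intro q _; simp
  | cons v r ih =>
    intro q hp
    have hge : ∀ x ∈ q, v ≤ x := by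
      rw [List.pairwise_append] at hp
      intro x hx
      exact hp.2.2 x hx v (List.mem_cons_self)
    simp only [List.foldl_cons]
    rw [pv_insert_step q v hge]
    have hlen : (q.length : Int) + 1 = ((q ++ [v]).length : Int) := by simp
    rw [hlen]
    have := ih (q ++ [v]) (by simpa using hp)
    simpa using this

-- generalized cumulation invariant: ds is the still-unprocessed strictly descending
-- suffix of the distinct values, t the number of elements already accumulated
theorem pv_cumgen (vs : List Int) : ∀ (ds : List Int) (t : Int),
    ds.Pairwise (fun a b : Int => a > b) →
    (∀ x ∈ vs, x ∉ ds → ∀ u ∈ ds, u < x) →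
    t = (vs.countP (fun x => decide (x ∉ ds)) : Int) →
    pvCum t (ds.map (fun u => (u, (vs.count u : Int)))) = ds.map (fun u => (u, pvCnt vs u)) := by
  intro ds
  induction ds with
  | nil => intro t _ _ _; simp [pvCum]
  | cons d1 ds' ih =>
    intro t hpw hout ht
    have hd1notin : d1 ∉ ds' := fun h => absurd ((List.pairwise_cons.1 hpw).1 d1 h) (lt_irrefl d1)
    have hhead : t + (vs.count d1 : Int) = pvCnt vs d1 := by
      unfold pvCnt
      rw [List.count_eq_countP]
      have := pv_countP_split (fun x => decide (d1 ≤ x)) (fun x => decide (x ∉ d1 :: ds')) (fun x => x == d1) vs ?_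
      · rw [ht, this]; push_cast; ring
      · intro x hx
        constructor
        · simp only [decide_eq_true_eq, beq_iff_eq]
          constructor
          · intro hle
            by_cases hxin : x ∈ d1 :: ds'
            · rcases List.mem_cons.1 hxin with h | h
              · exact Or.inr h
              · exact absurd ((List.pairwise_cons.1 hpw).1 x h) (by omega)
            · exact Or.inl hxin
          · rintro (hnx | he)
            · exact le_of_lt (hout x hx hnx d1 (List.mem_cons_self))
            · omega
        · simp only [decide_eq_true_eq, beq_iff_eq]
          rintro ⟨hnx, he⟩
          exact hnx (he ▸ List.mem_cons_self)
    have htail : t + (vs.count d1 : Int) = (vs.countP (fun x => decide (x ∉ ds')) : Int) := by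
      rw [List.count_eq_countP]
      have := pv_countP_split (fun x => decide (x ∉ ds')) (fun x => decide (x ∉ d1 :: ds')) (fun x => x == d1) vs ?_
      · rw [ht, this]; push_cast; ring
      · intro x hx
        constructor
        · simp only [decide_eq_true_eq, beq_iff_eq]
          constructor
          · intro hnx
            by_cases hxin : x ∈ d1 :: ds'
            · rcases List.mem_cons.1 hxin with h | h
              · exact Or.inr h
              · exact absurd h hnx
            · exact Or.inl hxin
          · rintro (hnx | he)
            · exact fun h => hnx (List.mem_cons_of_mem d1 h)
            · exact he ▸ hd1notin
        · simp only [decide_eq_true_eq, beq_iff_eq]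
          rintro ⟨hnx, he⟩
          exact hnx (he ▸ List.mem_cons_self)
    have hout' : ∀ x ∈ vs, x ∉ ds' → ∀ u ∈ ds', u < x := by
      intro x hx hnx u hu
      by_cases hxin : x ∈ d1 :: ds'
      · rcases List.mem_cons.1 hxin with h | h
        · exact h ▸ (List.pairwise_cons.1 hpw).1 u hu
        · exact absurd h hnx
      · exact hout x hx hxin u (List.mem_cons_of_mem d1 hu)
    simp only [List.map_cons, pvCum]
    rw [ih (t + (vs.count d1 : Int)) (List.pairwise_cons.1 hpw).2 hout' htail, hhead]

-- the counted histogram in descending key order, cumulated, is B's table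
theorem pv_cumlem (vs : List Int) (hs : vs.Pairwise (· ≥ ·)) :
    pvCum 0 ((PySem.Set.ofList vs).map (fun u => (u, (vs.count u : Int))))
      = (PySem.Set.ofList vs).map (fun u => (u, pvCnt vs u)) := by
  have hsub := pv_ofList_sublist vs
  have hpw : (PySem.Set.ofList vs).Pairwise (fun a b : Int => a > b) :=
    ((hs.sublist hsub).and (PySem.Set.nodup_ofList vs)).imp (fun h => lt_of_le_of_ne h.1 (Ne.symm h.2))
  have hmemall : ∀ x ∈ vs, x ∈ PySem.Set.ofList vs := fun x hx => by
    simp [PySem.Set.mem_ofList, hx]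
  exact pv_cumgen vs (PySem.Set.ofList vs) 0 hpw
    (fun x hx hnx => absurd (hmemall x hx) hnx)
    (by rw [List.countP_eq_zero.2 (fun x hx => by simp [hmemall x hx])]; simp)

theorem prepareFreqLen_spec : Claim_equal_prepareFreqLen := by
  intro w _hDom _hPre
  show prepareFreqLen w = prepareFreqLen_alt w
  unfold prepareFreqLen prepareFreqLen_alt
  have hstep : (fun (freqLen : PySem.Dict Int Int) (p : String × List Int) =>
      let v := PySem.List.pyGetD p.2 0 0
      let freqLen := if freqLen.contains v then freqLen else freqLen.insert v 0
      freqLen.insert v (freqLen.getD v 0 + 1))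
      = fun (d : PySem.Dict Int Int) (p : String × List Int) =>
          d.insert (PySem.List.pyGetD p.2 0 0) (d.getD (PySem.List.pyGetD p.2 0 0) 0 + 1) := by
    funext d p
    exact pv_stepA_eq d _
  have hfold : ∀ (l : List (String × List Int)),
      l.foldl (fun (d : PySem.Dict Int Int) p =>
        d.insert (PySem.List.pyGetD p.2 0 0) (d.getD (PySem.List.pyGetD p.2 0 0) 0 + 1)) PySem.Dict.empty
      = PySem.Dict.counter (l.map (fun p => PySem.List.pyGetD p.2 0 0)) := by
    intro l
    rw [← PySem.Dict.foldl_insert_getD_add_one_eq_counter, List.foldl_map]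
  have hBlist : ((PySem.Dict.ofList w).values.map (fun stat => PySem.List.pyGetD stat 0 0))
      = ((PySem.Dict.ofList w).items.map (fun p => PySem.List.pyGetD p.2 0 0)) := by
    simp [PySem.Dict.values, List.map_map, Function.comp_def]
  have hA1 : (PySem.List.sorted (PySem.Dict.ofList w).items (fun x => PySem.List.pyGetD x.2 0 0) true).map
        (fun p => PySem.List.pyGetD p.2 0 0)
      = PySem.List.sorted ((PySem.Dict.ofList w).items.map (fun p => PySem.List.pyGetD p.2 0 0)) (fun v => v) true := by
    apply List.Perm.eq_of_pairwise (le := fun a b : Int => b ≤ a) (l₁ := _) (l₂ := _)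
    · intro a b _ _ h1 h2; omega
    · exact (List.pairwise_map).2 (PySem.List.sorted_pairwise_rev _ _)
    · simpa using PySem.List.sorted_pairwise_rev ((PySem.Dict.ofList w).items.map (fun p => PySem.List.pyGetD p.2 0 0)) (fun v => v)
    · exact ((PySem.List.sorted_perm _ _ _).map _).trans (PySem.List.sorted_perm _ _ _).symm
  set vs := PySem.List.sorted ((PySem.Dict.ofList w).items.map (fun p => PySem.List.pyGetD p.2 0 0)) (fun v => v) true with hvs
  have hpvs : vs.Pairwise (fun a b : Int => a ≥ b) := by
    simpa using PySem.List.sorted_pairwise_rev ((PySem.Dict.ofList w).items.map (fun p => PySem.List.pyGetD p.2 0 0)) (fun v => v)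
  have hpwOf : (PySem.Set.ofList vs).Pairwise (fun a b : Int => a ≥ b) :=
    hpvs.sublist (pv_ofList_sublist vs)
  have hsortid : PySem.List.sorted ((PySem.Set.ofList vs).map (fun u => (u, (vs.count u : Int)))) (fun x => x.1) true
      = (PySem.Set.ofList vs).map (fun u => (u, (vs.count u : Int))) := by
    apply PySem.List.sorted_rev_eq_self_of_pairwise
    exact (List.pairwise_map).2 (hpwOf.imp (fun h => h))
  have hB := pv_Bloop vs [] (by simpa using hpvs)
  simp only [hstep, hfold, hA1, hBlist, ← hvs, PySem.Dict.items_counter, hsortid]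
  rw [pv_phase2 _ _ _ (fun p _ => by simp [PySem.Dict.empty, PySem.Dict.contains]) ?_]
  · rw [pv_cumlem vs hpvs]
    simp only [List.nil_append, PySem.Set.ofList_nil, List.map_nil, List.length_nil,
      Nat.cast_zero] at hB
    have : (PySem.Dict.mk ([] : List (Int × Int))) = PySem.Dict.empty := rfl
    rw [this] at hB
    rw [hB]
    simp [PySem.Dict.empty]
  · simp only [List.map_map]
    simp [Function.comp_def]
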